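-- pv_equiv track=rewrite | github.com/zaneta500200/projekty | email_validator.py | kropka2
-- ===== SOURCE A (Python) =====
-- def kropka2(txt):
--     cntr = []
--     if txt.count('.')>1:
--         for i in range(len(txt)):
--             if txt[i]=='.':
--                 cntr.append(i)
--     for i in range(len(cntr)):
--         if cntr[i-1]==(cntr[i])-1:
--             return False
--     else:
--         return True
-- ===== SOURCE B (Python) =====
-- def kropka2(txt):
--     return '..' not in txt
-- ===== Notes on version B (the rewrite author's own statement) =====
-- stated objective: simpler
-- what changed: Replaces A's two-phase 'collect all dot indices into a list, then scan that list for adjacent index pairs (with a wraparound first comparison)' by a single two-character-substring membership test (checking whether the string contains a double dot).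
import Mathlib
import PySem

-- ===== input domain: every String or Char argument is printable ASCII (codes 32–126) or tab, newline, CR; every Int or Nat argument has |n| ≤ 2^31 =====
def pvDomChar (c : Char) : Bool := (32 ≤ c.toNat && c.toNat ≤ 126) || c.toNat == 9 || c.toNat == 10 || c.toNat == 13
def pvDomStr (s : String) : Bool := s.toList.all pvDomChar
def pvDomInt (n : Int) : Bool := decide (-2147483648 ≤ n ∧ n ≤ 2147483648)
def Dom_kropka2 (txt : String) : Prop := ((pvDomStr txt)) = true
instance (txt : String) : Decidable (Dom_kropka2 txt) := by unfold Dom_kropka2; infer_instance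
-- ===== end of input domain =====

-- B replaces A's dot-index-list construction and adjacent-index scan by a direct substring test ('..' not in txt); objective: simpler.

-- ===== PORT A =====
-- the second 'for i in range(len(cntr))' loop with its early 'return False'
def kropkaLoop (cntr : List Int) : List Int → Bool
  | [] => true
  | i :: rest =>
    if PySem.List.pyGetD cntr (i - 1) 0 = PySem.List.pyGetD cntr i 0 - 1 then false
    else kropkaLoop cntr rest

def kropka2 (txt : String) : Bool :=
  let s := txt.toList
  -- cntr = [] ; if txt.count('.') > 1: for i in range(len(txt)): if txt[i]=='.': cntr.append(i)
  let cntr : List Int :=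
    if PySem.Str.count txt "." > 1 then
      (PySem.List.pyRange 0 (PySem.List.len s) 1).foldl
        (fun acc i => if PySem.List.pyGetD s i ' ' = '.' then acc ++ [i] else acc) []
    else []
  -- for i in range(len(cntr)): if cntr[i-1]==cntr[i]-1: return False / else: return True
  kropkaLoop cntr (PySem.List.pyRange 0 (PySem.List.len cntr) 1)

-- ===== PORT B =====
def kropka2_alt (txt : String) : Bool := !(PySem.Str.isIn ".." txt)

-- ===== PRECONDITION & SPEC =====
def Spec_kropka2 (txt : String) (out : Bool) : Prop := out = kropka2_alt txt
instance (txt : String) (out : Bool) : Decidable (Spec_kropka2 txt out) := by unfold Spec_kropka2; infer_instance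

-- ===== CLAIM (what is proved, stated in full; the proofs are below) =====
def Claim_equal_kropka2 : Prop := ∀ (txt : String), Dom_kropka2 txt → Spec_kropka2 txt (kropka2 txt)

-- ===== LEMMAS AND PROOFS =====

-- the list of indices of '.' in t, offset by k (what A's first loop builds)
def pvDots : List Char → Int → List Int
  | [], _ => []
  | c :: r, k => if c = '.' then k :: pvDots r (k + 1) else pvDots r (k + 1)

-- adjacent-pair check on the index list (what A's second loop does from i = 1 on)
def pvPairsOK : List Int → Bool
  | a :: b :: r => if a = b - 1 then false else pvPairsOK (b :: r)
  | _ => true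

lemma pvDots_mem_ge : ∀ (t : List Char) (k x : Int), x ∈ pvDots t k → k ≤ x := by
  intro t
  induction t with
  | nil => intro k x h; simp [pvDots] at h
  | cons c r ih =>
    intro k x h
    by_cases hc : c = '.' <;> simp [pvDots, hc] at h
    · rcases h with h | h
      · omega
      · have := ih (k + 1) x h; omega
    · have := ih (k + 1) x h; omega

lemma pvDots_pairwise : ∀ (t : List Char) (k : Int), (pvDots t k).Pairwise (· < ·) := by
  intro t
  induction t with
  | nil => intro k; simp [pvDots]
  | cons c r ih =>
    intro k
    by_cases hc : c = '.' <;> simp [pvDots, hc]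
    · exact ⟨fun x hx => by have := pvDots_mem_ge r (k + 1) x hx; omega, ih (k + 1)⟩
    · exact ih (k + 1)

lemma pvDots_ne_nil_of_mem : ∀ (t : List Char) (k : Int), '.' ∈ t → pvDots t k ≠ [] := by
  intro t
  induction t with
  | nil => intro k h; simp at h
  | cons c r ih =>
    intro k h
    by_cases hc : c = '.' <;> simp [pvDots, hc]
    · have : '.' ∈ r := by
        rcases List.mem_cons.mp h with h | h
        · exact absurd h.symm hc
        · exact h
      exact ih (k + 1) this

-- Chars.count with a single-character needle is List.count
lemma pvCountGo : ∀ (fuel : Nat) (t : List Char) (acc : Nat), t.length ≤ fuel →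
    PySem.Chars.count.go ['.'] fuel t acc = acc + t.count '.' := by
  intro fuel
  induction fuel with
  | zero =>
    intro t acc h
    have : t = [] := List.eq_nil_of_length_eq_zero (Nat.le_zero.mp h)
    subst this; simp [PySem.Chars.count.go]
  | succ n ih =>
    intro t acc h
    cases t with
    | nil => simp [PySem.Chars.count.go]
    | cons c r =>
      by_cases hc : c = '.'
      · subst hc
        simp only [PySem.Chars.count.go, List.isPrefixOf, BEq.rfl, Bool.true_and,
          if_true]
        rw [show List.drop ['.'].length ('.' :: r) = r from rfl]
        rw [ih r (acc + 1) (by simpa using Nat.lt_succ_iff.mp (by simpa using h))]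
        simp only [List.count_cons, BEq.rfl, if_true]
        omega
      · have hpre : List.isPrefixOf ['.'] (c :: r) = false := by
          simp [List.isPrefixOf]
          exact fun h' => hc h'.symm
        simp only [PySem.Chars.count.go, hpre]
        rw [ih r acc (by simpa using Nat.lt_succ_iff.mp (by simpa using h))]
        simp [hc]

lemma pvCountDot (s : List Char) : PySem.Chars.count s ['.'] = s.count '.' := by
  simp [PySem.Chars.count]
  simpa using pvCountGo s.length s 0 le_rfl

-- A's first loop builds exactly pvDots
lemma pvFoldDots : ∀ (t full : List Char) (k : Nat) (acc : List Int), full.drop k = t →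
    (PySem.List.pyRange (k : Int) (full.length : Int) 1).foldl
      (fun a i => if PySem.List.pyGetD full i ' ' = '.' then a ++ [i] else a) acc
    = acc ++ pvDots t (k : Int) := by
  intro t
  induction t with
  | nil =>
    intro full k acc h
    have hk : full.length ≤ k := by
      by_contra hlt
      rw [not_le] at hlt
      have := List.drop_eq_nil_iff.mp h
      omega
    rw [PySem.List.pyRange_one_eq_nil (by exact_mod_cast hk)]
    simp [pvDots]
  | cons c r ih =>
    intro full k acc h
    have hk : k < full.length := by
      by_contra hge
      rw [not_lt] at hge
      rw [List.drop_eq_nil_iff.mpr hge] at h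
      exact List.cons_ne_nil _ _ h.symm
    have hget : full[k] = c := by
      have h0 : full[k + 0]? = some c := by rw [← List.getElem?_drop, h]; rfl
      simp only [Nat.add_zero] at h0
      obtain ⟨_, hg⟩ := List.getElem?_eq_some_iff.mp h0
      exact hg
    have hdrop : full.drop (k + 1) = r := by
      have := congrArg List.tail h
      rwa [← List.drop_one, List.drop_drop] at this
    rw [PySem.List.pyRange_one_cons (by exact_mod_cast hk)]
    simp only [List.foldl_cons]
    have hgd : PySem.List.pyGetD full (k : Int) ' ' = c := by
      rw [PySem.List.pyGetD_natCast, List.getD_eq_getElem _ _ hk, hget]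
    rw [hgd]
    have hcast : (k : Int) + 1 = ((k + 1 : Nat) : Int) := by push_cast; ring
    by_cases hc : c = '.'
    · simp only [hc, if_true]
      rw [hcast, ih full (k + 1) (acc ++ [(k : Int)]) hdrop]
      simp [pvDots, ← hcast]
    · simp only [hc, if_false]
      rw [hcast, ih full (k + 1) acc hdrop]
      simp [pvDots, hc, ← hcast]

-- A's second loop from index j+1 on is the adjacent-pair check on cntr.drop j
lemma pvLoopDrop : ∀ (n : Nat) (cntr : List Int) (j : Nat), cntr.length - j ≤ n →
    kropkaLoop cntr (PySem.List.pyRange ((j : Int) + 1) (cntr.length : Int) 1)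
      = pvPairsOK (cntr.drop j) := by
  intro n
  induction n with
  | zero =>
    intro cntr j h
    have hj : cntr.length ≤ j := by omega
    rw [PySem.List.pyRange_one_eq_nil (by exact_mod_cast by omega : (cntr.length : Int) ≤ (j : Int) + 1)]
    rw [List.drop_eq_nil_iff.mpr hj]
    rfl
  | succ n ih =>
    intro cntr j h
    by_cases hj : cntr.length ≤ j + 1
    · rw [PySem.List.pyRange_one_eq_nil (by exact_mod_cast hj)]
      rcases Nat.lt_or_ge j cntr.length with hlt | hge
      · have : j + 1 = cntr.length := by omega
        have hdrop : (cntr.drop j).length = 1 := by simp [List.length_drop]; omega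
        cases e : cntr.drop j with
        | nil => simp [e] at hdrop
        | cons a t =>
          cases t with
          | nil => simp [pvPairsOK, kropkaLoop]
          | cons b r => simp [e] at hdrop
      · rw [List.drop_eq_nil_iff.mpr hge]; rfl
    · have hj1 : j + 1 < cntr.length := by omega
      have hjlt : j < cntr.length := by omega
      rw [PySem.List.pyRange_one_cons (by exact_mod_cast hj1)]
      simp only [kropkaLoop]
      have e1 : PySem.List.pyGetD cntr ((j : Int) + 1 - 1) 0 = cntr[j] := by
        have : (j : Int) + 1 - 1 = (j : Int) := by ring
        rw [this, PySem.List.pyGetD_natCast, List.getD_eq_getElem _ _ hjlt]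
      have e2 : PySem.List.pyGetD cntr ((j : Int) + 1) 0 = cntr[j + 1] := by
        have : (j : Int) + 1 = ((j + 1 : Nat) : Int) := by push_cast; ring
        rw [this, PySem.List.pyGetD_natCast, List.getD_eq_getElem _ _ hj1]
      rw [e1, e2]
      have hdropj : cntr.drop j = cntr[j] :: cntr[j + 1] :: cntr.drop (j + 2) := by
        rw [List.drop_eq_getElem_cons hjlt, List.drop_eq_getElem_cons hj1]
      have hdropj1 : cntr.drop (j + 1) = cntr[j + 1] :: cntr.drop (j + 2) :=
        List.drop_eq_getElem_cons hj1
      rw [hdropj]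
      simp only [pvPairsOK]
      by_cases hcond : cntr[j] = cntr[j + 1] - 1
      · simp [hcond]
      · simp only [hcond, if_false]
        have hcast : (j : Int) + 1 + 1 = ((j + 1 : Nat) : Int) + 1 := by push_cast; ring
        rw [hcast, ih cntr (j + 1) (by omega), hdropj1]

-- the adjacent-pair check on the dot indices is the no-'..'-substring test
lemma pvPairsOK_iff : ∀ (t : List Char) (k : Int),
    pvPairsOK (pvDots t k) = true ↔ ¬ (['.', '.'] <:+: t) := by
  intro t
  induction t with
  | nil => intro k; simp [pvDots, pvPairsOK]
  | cons c r ih =>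
    intro k
    by_cases hc : c = '.'
    · subst hc
      cases r with
      | nil =>
        simp [pvDots, pvPairsOK]
        decide
      | cons d r' =>
        by_cases hd : d = '.'
        · subst hd
          have : pvDots ('.' :: '.' :: r') k = k :: (k + 1) :: pvDots r' (k + 2) := by
            simp [pvDots]; ring_nf
          rw [this]
          simp only [pvPairsOK]
          constructor
          · intro h; simp at h
          · intro h
            exact absurd (⟨[], r', by simp⟩ : ['.', '.'] <:+: '.' :: '.' :: r') h
        · have hdots : pvDots ('.' :: d :: r') k = k :: pvDots r' (k + 2) := by
            simp [pvDots, hd]; ring_nf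
          have hstep : pvPairsOK (k :: pvDots r' (k + 2)) = pvPairsOK (pvDots r' (k + 2)) := by
            cases hx : pvDots r' (k + 2) with
            | nil => simp [pvPairsOK]
            | cons b X =>
              have hb : k + 2 ≤ b := pvDots_mem_ge r' (k + 2) b (by rw [hx]; exact List.mem_cons_self)
              simp only [pvPairsOK]
              have : ¬ (k = b - 1) := by omega
              simp [this]
          have hdots2 : pvDots (d :: r') (k + 1) = pvDots r' (k + 2) := by
            simp [pvDots, hd]; ring_nf
          rw [hdots, hstep, ← hdots2, ih (k + 1)]
          constructor
          · intro h hin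
            apply h
            rcases List.infix_cons_iff.mp hin with hpre | hinf
            · rcases List.cons_prefix_cons.mp hpre with ⟨_, hpre2⟩
              rcases List.cons_prefix_cons.mp hpre2 with ⟨hd', _⟩
              exact absurd hd'.symm hd
            · exact hinf
          · intro h hin
            exact h (List.infix_cons_iff.mpr (Or.inr hin))
    · have : pvDots (c :: r) k = pvDots r (k + 1) := by simp [pvDots, hc]
      rw [this, ih (k + 1)]
      constructor
      · intro h hin
        apply h
        rcases List.infix_cons_iff.mp hin with hpre | hinf
        · rcases List.cons_prefix_cons.mp hpre with ⟨hd', _⟩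
          exact absurd hd'.symm hc
        · exact hinf
      · intro h hin
        exact h (List.infix_cons_iff.mpr (Or.inr hin))

lemma pvInfix_count (s : List Char) (h : ['.', '.'] <:+: s) : 2 ≤ s.count '.' := by
  rcases h with ⟨u, v, huv⟩
  subst huv
  simp [List.count_append]
  omega

lemma pvInfix_mem (s : List Char) (h : ['.', '.'] <:+: s) : '.' ∈ s := by
  rcases h with ⟨u, v, huv⟩
  subst huv
  simp

-- the wraparound comparison cntr[-1] == cntr[0]-1 never fires on the (strictly increasing) dot list
lemma pvWrapNe (t : List Char) (c0 : Int) (rest : List Int) (h : pvDots t 0 = c0 :: rest) :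
    PySem.List.pyGetD (c0 :: rest) (-1) 0 ≠ PySem.List.pyGetD (c0 :: rest) 0 0 - 1 := by
  have hne : (c0 :: rest) ≠ [] := List.cons_ne_nil _ _
  rw [PySem.List.pyGetD_neg_one _ _ hne, PySem.List.pyGetD_zero_cons]
  have hmem : (c0 :: rest).getLast hne ∈ c0 :: rest := List.getLast_mem hne
  have hpw : (c0 :: rest).Pairwise (· < ·) := by rw [← h]; exact pvDots_pairwise t 0
  rcases List.mem_cons.mp hmem with heq | hmem'
  · rw [heq]; omega
  · have : c0 < (c0 :: rest).getLast hne := (List.pairwise_cons.mp hpw).1 _ hmem'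
    omega

-- ===== VERDICT (by name: the statement is the Claim_ definition above) =====
theorem kropka2_spec : Claim_equal_kropka2 := by
  intro txt _
  unfold Spec_kropka2 kropka2 kropka2_alt
  simp only [PySem.Str.count_eq, PySem.Str.isIn_eq]
  have hdots : ("..".toList : List Char) = ['.', '.'] := rfl
  have hdot : (".".toList : List Char) = ['.'] := rfl
  simp only [hdots, hdot, pvCountDot]
  set l := txt.toList with hl
  by_cases hin : PySem.Chars.isIn ['.', '.'] l = true
  · -- '..' occurs: both sides are false
    have hinf : ['.', '.'] <:+: l := (PySem.Chars.isIn_iff_infix _ _).mp hin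
    have hcnt : 1 < l.count '.' := pvInfix_count l hinf
    simp only [hcnt, if_true, hin, Bool.not_true]
    have hfold := pvFoldDots l l 0 [] (by simp)
    simp only [Nat.cast_zero, List.nil_append] at hfold
    rw [PySem.List.len_eq, hfold]
    cases hd : pvDots l 0 with
    | nil => exact absurd hd (pvDots_ne_nil_of_mem l 0 (pvInfix_mem l hinf))
    | cons c0 rest =>
      have hlen : 0 < (c0 :: rest).length := by simp
      rw [PySem.List.len_eq, PySem.List.pyRange_one_cons (by exact_mod_cast hlen)]
      simp only [kropkaLoop]
      split_ifs with hcond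
      · rfl
      · have hLD := pvLoopDrop (c0 :: rest).length (c0 :: rest) 0 (by omega)
        norm_num at hLD ⊢
        rw [hLD, ← hd, ← Bool.not_eq_true, pvPairsOK_iff l 0]
        exact fun hno => hno hinf
  · -- no '..': both sides are true
    have hnin : PySem.Chars.isIn ['.', '.'] l = false := by simpa using hin
    have hninf : ¬ (['.', '.'] <:+: l) := (PySem.Chars.isIn_eq_false_iff _ _).mp hnin
    simp only [hnin, Bool.not_false]
    by_cases hcnt : 1 < l.count '.'
    · simp only [hcnt, if_true]
      have hfold := pvFoldDots l l 0 [] (by simp)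
      simp only [Nat.cast_zero, List.nil_append] at hfold
      rw [PySem.List.len_eq, hfold]
      cases hd : pvDots l 0 with
      | nil => simp [PySem.List.len_eq, kropkaLoop]
      | cons c0 rest =>
        have hlen : 0 < (c0 :: rest).length := by simp
        rw [PySem.List.len_eq, PySem.List.pyRange_one_cons (by exact_mod_cast hlen)]
        simp only [kropkaLoop]
        have hw := pvWrapNe l c0 rest hd
        split_ifs with hcond
        · exact absurd (by simpa using hcond) hw
        · have hLD := pvLoopDrop (c0 :: rest).length (c0 :: rest) 0 (by omega)
          norm_num at hLD ⊢
          rw [hLD, ← hd]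
          exact (pvPairsOK_iff l 0).mpr hninf
    · simp only [hcnt, if_false]
      simp [PySem.List.len_eq, kropkaLoop]
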